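-- pv_equiv track=rewrite | github.com/xaviomvi/omvi-pipes-ai | backend/python/code-generator/microsoft.py | clean_generated_code
-- ===== SOURCE A (Python) =====
-- def clean_generated_code(code: str) -> str:
--     """Clean up generated code by removing excessive whitespace."""
--     lines = code.split('\n')
--     cleaned_lines = []
--
--     for line in lines:
--         cleaned_line = line.rstrip()
--         cleaned_lines.append(cleaned_line)
--
--     # Remove excessive blank lines
--     final_lines = []
--     blank_count = 0
--
--     for line in cleaned_lines:
--         if line.strip() == "":
--             blank_count += 1
--             if blank_count <= 2:
--                 final_lines.append(line)
--         else:
--             blank_count = 0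
--             final_lines.append(line)
--
--     # Clean start and end
--     while final_lines and final_lines[0].strip() == "":
--         final_lines.pop(0)
--
--     while final_lines and final_lines[-1].strip() == "":
--         final_lines.pop()
--
--     if final_lines:
--         final_lines.append("")
--
--     return '\n'.join(final_lines)
-- ===== SOURCE B (Python) =====
-- def clean_generated_code(code: str) -> str:
--     """Clean up generated code by removing excessive whitespace."""
--     lines = [line.rstrip() for line in code.split('\n')]
--
--     # Collapse each run of blank lines to at most two (two-pointer run grouping).
--     kept = []
--     i, n = 0, len(lines)
--     while i < n:
--         if lines[i]:
--             kept.append(lines[i])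
--             i += 1
--         else:
--             j = i
--             while j < n and not lines[j]:
--                 j += 1
--             kept.extend([''] * min(2, j - i))
--             i = j
--
--     # Trim blank lines from both ends: one helper, applied to the list and its reverse.
--     def drop_leading_blanks(ls):
--         for k, line in enumerate(ls):
--             if line:
--                 return ls[k:]
--         return []
--
--     body = drop_leading_blanks(drop_leading_blanks(kept)[::-1])[::-1]
--     return '\n'.join(body) + '\n' if body else ''
-- ===== Notes on version B (the rewrite author's own statement) =====
-- stated objective: alternative
-- what changed: B replaces A's blank-line counter fold and its two end-trimming pop loops by two-pointer run grouping (collapse each blank run to at most two lines in one inner scan) and a single drop-leading-blanks helper applied to the list and to its reverse, joining with a trailing newline instead of appending a sentinel empty line.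
import Mathlib
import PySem

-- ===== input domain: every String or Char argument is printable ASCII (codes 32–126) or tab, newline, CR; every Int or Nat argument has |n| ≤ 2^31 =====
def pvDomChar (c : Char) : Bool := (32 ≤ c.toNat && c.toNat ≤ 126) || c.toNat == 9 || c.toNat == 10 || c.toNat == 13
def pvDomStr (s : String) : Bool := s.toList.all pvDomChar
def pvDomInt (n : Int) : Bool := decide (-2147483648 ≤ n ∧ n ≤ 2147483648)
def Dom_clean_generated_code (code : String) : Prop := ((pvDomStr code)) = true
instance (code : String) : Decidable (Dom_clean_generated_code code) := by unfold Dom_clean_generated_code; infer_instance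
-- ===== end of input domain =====

-- B replaces A's blank-line counter and the two end-trimming pop loops by two-pointer
-- run grouping plus a single drop-leading-blanks helper applied to the list and its
-- reverse (objective: alternative decomposition, same cost).

-- ===== PORT A =====
-- the body of A's second loop (blank_count, final_lines as the fold state)
def stepA (st : Int × List String) (line : String) : Int × List String :=
  if PySem.Str.strip line = "" then
    let bc := st.1 + 1
    (bc, if bc ≤ 2 then st.2 ++ [line] else st.2)
  else
    (0, st.2 ++ [line])

-- `while final_lines and final_lines[0].strip() == "": final_lines.pop(0)`
def popFrontA : List String → List String
  | [] => []
  | l :: ls => if PySem.Str.strip l = "" then popFrontA ls else l :: ls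

-- `while final_lines and final_lines[-1].strip() == "": final_lines.pop()`
-- `final_lines[-1]` ported as getLastD: the loop guard keeps the list non-empty;
-- the fuel only makes the loop total: each pass removes one element, so xs.length passes suffice
def popBackAGo : Nat → List String → List String
  | 0, xs => xs
  | fuel + 1, xs =>
    if xs ≠ [] ∧ PySem.Str.strip (xs.getLastD "") = "" then popBackAGo fuel xs.dropLast else xs

def popBackA (xs : List String) : List String := popBackAGo xs.length xs

def clean_generated_code (code : String) : String :=
  let lines := (PySem.Str.split? code "\n").getD []   -- sep "\n" ≠ "": split? is never none
  let cleaned_lines := lines.foldl (fun acc line => acc ++ [PySem.Str.rstrip line]) []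
  let final_lines := (cleaned_lines.foldl stepA ((0 : Int), ([] : List String))).2
  let f1 := popFrontA final_lines
  let f2 := popBackA f1
  let f3 := if f2 = [] then f2 else f2 ++ [""]
  PySem.Str.join "\n" f3

-- ===== PORT B =====
-- inner `while j < n and not lines[j]: j += 1` (the index stays in range by the guard, so
-- getD is exact; the fuel only makes the loop total: j grows each pass, so n - j passes suffice)
def scanRunGo (lines : List String) : Nat → Nat → Nat
  | 0, j => j
  | fuel + 1, j => if j < lines.length ∧ lines.getD j "" = "" then scanRunGo lines fuel (j + 1) else j

def scanRun (lines : List String) (j : Nat) : Nat := scanRunGo lines (lines.length - j) j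

-- outer while loop: emit non-blank lines one by one, collapse each blank run to ≤ 2 lines
-- (fuel only makes the loop total: i grows each pass, so n - i passes suffice)
def emitRunsGo (lines : List String) : Nat → Nat → List String → List String
  | 0, _, kept => kept
  | fuel + 1, i, kept =>
    if i < lines.length then
      if lines.getD i "" ≠ "" then
        emitRunsGo lines fuel (i + 1) (kept ++ [lines.getD i ""])
      else
        emitRunsGo lines fuel (scanRun lines i) (kept ++ List.replicate (min 2 (scanRun lines i - i)) "")
    else kept

def emitRuns (lines : List String) (i : Nat) (kept : List String) : List String :=
  emitRunsGo lines (lines.length - i) i kept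

-- `def drop_leading_blanks(ls): for k, line in enumerate(ls): if line: return ls[k:]; return []`
def dropLeadingBlanks : List String → List String
  | [] => []
  | l :: ls => if l ≠ "" then l :: ls else dropLeadingBlanks ls

def clean_generated_code_alt (code : String) : String :=
  let lines := ((PySem.Str.split? code "\n").getD []).map PySem.Str.rstrip
  let kept := emitRuns lines 0 []
  let body := (dropLeadingBlanks ((dropLeadingBlanks kept).reverse)).reverse
  if body = [] then "" else PySem.Str.join "\n" body ++ "\n"

-- ===== PRECONDITION & SPEC =====
def Spec_clean_generated_code (code : String) (out : String) : Prop := out = clean_generated_code_alt code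
instance (code : String) (out : String) : Decidable (Spec_clean_generated_code code out) := by unfold Spec_clean_generated_code; infer_instance

-- ===== CLAIM (what is proved, stated in full; the proofs are below) =====
def Claim_equal_clean_generated_code : Prop := ∀ (code : String), Dom_clean_generated_code code → Spec_clean_generated_code code (clean_generated_code code)

-- ===== LEMMAS AND PROOFS =====

-- canonical middle stage: A's counter loop and B's run grouping both compute `collapse 0`
def collapse (k : Int) : List String → List String
  | [] => []
  | l :: ls =>
    if l = "" then
      (if k + 1 ≤ 2 then l :: collapse (k + 1) ls else collapse (k + 1) ls)
    else l :: collapse 0 ls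

theorem chars_strip_rstrip (cs : List Char) :
    PySem.Chars.strip (PySem.Chars.rstrip cs) = [] ↔ PySem.Chars.rstrip cs = [] := by
  constructor
  · intro h
    by_contra hne
    have hxr : (PySem.Chars.rstrip cs).reverse = List.dropWhile PySem.Chars.isspace cs.reverse := by
      simp [PySem.Chars.rstrip]
    obtain ⟨c, t, hct⟩ : ∃ c t, (PySem.Chars.rstrip cs).reverse = c :: t := by
      cases h' : (PySem.Chars.rstrip cs).reverse with
      | nil => exact absurd (by simpa using h') hne
      | cons c t => exact ⟨c, t, rfl⟩
    have h5 : List.dropWhile PySem.Chars.isspace cs.reverse = c :: t := hxr.symm.trans hct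
    have hc : PySem.Chars.isspace c = false := by
      have := List.head_dropWhile_not (p := PySem.Chars.isspace) (l := cs.reverse)
        (by rw [h5]; simp)
      simpa [h5] using this
    have hall : ∀ x ∈ PySem.Chars.rstrip cs, PySem.Chars.isspace x = true := by
      intro x hx
      have h2 : List.dropWhile PySem.Chars.isspace
          (List.dropWhile PySem.Chars.isspace (PySem.Chars.rstrip cs)).reverse = [] := by
        simpa [PySem.Chars.strip, PySem.Chars.lstrip, PySem.Chars.rstrip] using
          congrArg List.reverse h
      have h3 := List.dropWhile_eq_nil_iff.mp h2
      rcases (List.mem_append.mp ((List.takeWhile_append_dropWhile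
          (p := PySem.Chars.isspace) (l := PySem.Chars.rstrip cs)) ▸ hx)) with h4 | h4
      · exact List.mem_takeWhile_imp h4
      · exact h3 _ (List.mem_reverse.mpr h4)
    have hcm : c ∈ PySem.Chars.rstrip cs := by
      rw [← List.mem_reverse, hct]; exact List.mem_cons_self
    rw [hall c hcm] at hc; simp at hc
  · intro h; rw [h]; rfl

-- a line that is already rstripped strips to "" iff it IS ""
theorem strip_rstrip_eq_empty_iff (s : String) :
    (PySem.Str.strip (PySem.Str.rstrip s) = "" ↔ PySem.Str.rstrip s = "") := by
  rw [← String.toList_inj, ← String.toList_inj]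
  simpa using chars_strip_rstrip s.toList

theorem foldA_eq_collapse (ls : List String) :
    (∀ l ∈ ls, (PySem.Str.strip l = "" ↔ l = "")) →
    ∀ (k : Int) (acc : List String), (ls.foldl stepA (k, acc)).2 = acc ++ collapse k ls := by
  induction ls with
  | nil => intro _ k acc; simp [collapse]
  | cons l ls ih =>
    intro hyp k acc
    have hl := hyp l (List.mem_cons_self)
    have hls : ∀ x ∈ ls, (PySem.Str.strip x = "" ↔ x = "") :=
      fun x hx => hyp x (List.mem_cons_of_mem _ hx)
    by_cases hb : l = ""
    · subst hb
      have hstrip : PySem.Str.strip "" = "" := hl.mpr rfl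
      rw [List.foldl_cons, collapse]
      by_cases h2 : k + 1 ≤ 2
      · have hstep : stepA (k, acc) "" = (k + 1, acc ++ [""]) := by
          simp [stepA, hstrip, h2]
        rw [hstep, ih hls, if_pos rfl, if_pos h2]
        simp
      · have hstep : stepA (k, acc) "" = (k + 1, acc) := by
          simp [stepA, hstrip, h2]
        rw [hstep, ih hls, if_pos rfl, if_neg h2]
    · have hstrip : PySem.Str.strip l ≠ "" := fun h => hb (hl.mp h)
      simp only [List.foldl_cons, stepA, if_neg hstrip, collapse, if_neg hb, ih hls,
        List.append_assoc, List.singleton_append]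

theorem le_scanRunGo (lines : List String) :
    ∀ fuel j, j ≤ scanRunGo lines fuel j := by
  intro fuel
  induction fuel with
  | zero => intro j; rfl
  | succ fuel ih =>
    intro j
    rw [scanRunGo]
    split_ifs with h
    · exact le_trans (by omega) (ih (j + 1))
    · rfl

theorem scanRunGo_le_length (lines : List String) :
    ∀ fuel j, j ≤ lines.length → scanRunGo lines fuel j ≤ lines.length := by
  intro fuel
  induction fuel with
  | zero => intro j hj; exact hj
  | succ fuel ih =>
    intro j hj
    rw [scanRunGo]
    split_ifs with h
    · exact ih (j + 1) (by omega)
    · exact hj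

theorem scanRun_le_length (lines : List String) (j : Nat) (hj : j ≤ lines.length) :
    scanRun lines j ≤ lines.length :=
  scanRunGo_le_length lines _ j hj

theorem scanRunGo_blank_run (lines : List String) :
    ∀ fuel j, lines.drop j =
      List.replicate (scanRunGo lines fuel j - j) "" ++ lines.drop (scanRunGo lines fuel j) := by
  intro fuel
  induction fuel with
  | zero => intro j; simp [scanRunGo]
  | succ fuel ih =>
    intro j
    rw [scanRunGo]
    split_ifs with h
    · have hlt : j < lines.length := h.1
      have hget : lines[j] = "" := by
        have := h.2; rwa [List.getD_eq_getElem lines "" hlt] at this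
      have hdrop : lines.drop j = lines[j] :: lines.drop (j + 1) :=
        List.drop_eq_getElem_cons hlt
      have hle := le_scanRunGo lines fuel (j + 1)
      rw [hdrop, hget, ih (j + 1)]
      have hcount : scanRunGo lines fuel (j + 1) - j
          = (scanRunGo lines fuel (j + 1) - (j + 1)) + 1 := by omega
      rw [hcount, List.replicate_succ]
      simp
    · simp

theorem scanRun_blank_run (lines : List String) (j : Nat) :
    lines.drop j = List.replicate (scanRun lines j - j) "" ++ lines.drop (scanRun lines j) :=
  scanRunGo_blank_run lines _ j

theorem scanRunGo_stop (lines : List String) :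
    ∀ fuel j, lines.length - j ≤ fuel → scanRunGo lines fuel j < lines.length →
      lines.getD (scanRunGo lines fuel j) "" ≠ "" := by
  intro fuel
  induction fuel with
  | zero => intro j hf hlt; rw [scanRunGo] at hlt; omega
  | succ fuel ih =>
    intro j hf
    rw [scanRunGo]
    split_ifs with h
    · exact ih (j + 1) (by omega)
    · intro hlt
      rcases not_and_or.mp h with h1 | h1
      · exact absurd hlt h1
      · exact fun hc => h1 hc

theorem scanRun_stop (lines : List String) (j : Nat) (h : scanRun lines j < lines.length) :
    lines.getD (scanRun lines j) "" ≠ "" :=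
  scanRunGo_stop lines _ j (by omega) h

-- entering a blank position strictly advances the scan
theorem lt_scanRun_of_blank (lines : List String) (i : Nat)
    (hi : i < lines.length) (hbl : lines.getD i "" = "") : i < scanRun lines i := by
  unfold scanRun
  have hfuel : lines.length - i = (lines.length - (i + 1)) + 1 := by omega
  rw [hfuel, scanRunGo, if_pos ⟨hi, hbl⟩]
  exact lt_of_lt_of_le (by omega) (le_scanRunGo lines _ (i + 1))

-- collapse keeps min m 2 lines of a blank run of length m entered with counter k = 0
theorem collapse_replicate :
    ∀ (m : Nat) (k : Int), 0 ≤ k → ∀ rest,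
      collapse k (List.replicate m "" ++ rest) =
        List.replicate (min m (2 - k).toNat) "" ++ collapse (k + m) rest := by
  intro m
  induction m with
  | zero => intro k _ rest; simp
  | succ m ih =>
    intro k hk rest
    rw [List.replicate_succ, List.cons_append]
    show collapse k ("" :: (List.replicate m "" ++ rest)) = _
    rw [collapse]
    simp only [reduceIte]
    rw [ih (k + 1) (by omega) rest]
    have harg : k + 1 + (m : Int) = k + ((m + 1 : Nat) : Int) := by push_cast; ring
    rw [harg]
    by_cases h2 : k + 1 ≤ 2
    · rw [if_pos h2]
      have hcount : min (m + 1) (2 - k).toNat = (min m (2 - (k + 1)).toNat) + 1 := by omega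
      rw [hcount, List.replicate_succ]
      simp
    · rw [if_neg h2]
      have hc1 : min m (2 - (k + 1)).toNat = 0 := by omega
      have hc2 : min (m + 1) (2 - k).toNat = 0 := by omega
      rw [hc1, hc2]

-- the counter is irrelevant when the list is empty or starts with a non-blank line
theorem collapse_reset (k₁ k₂ : Int) :
    ∀ rest : List String, (rest = [] ∨ ∃ l t, rest = l :: t ∧ l ≠ "") →
      collapse k₁ rest = collapse k₂ rest := by
  intro rest h
  rcases h with rfl | ⟨l, t, rfl, hl⟩
  · rfl
  · rw [collapse, collapse, if_neg hl, if_neg hl]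

theorem emitRunsGo_eq (lines : List String) :
    ∀ fuel i kept, lines.length - i ≤ fuel →
      emitRunsGo lines fuel i kept = kept ++ collapse 0 (lines.drop i) := by
  intro fuel
  induction fuel with
  | zero =>
    intro i kept hf
    have : lines.drop i = [] := by rw [List.drop_eq_nil_iff]; omega
    rw [this, emitRunsGo]
    simp [collapse]
  | succ fuel ih =>
    intro i kept hf
    rw [emitRunsGo]
    by_cases hi : i < lines.length
    · rw [if_pos hi]
      by_cases hne : lines.getD i "" ≠ ""
      · rw [if_pos hne]
        have hget : lines.getD i "" = lines[i] := List.getD_eq_getElem lines "" hi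
        rw [List.drop_eq_getElem_cons hi, collapse, if_neg (by rwa [hget] at hne)]
        rw [ih (i + 1) _ (by omega)]
        simp [List.getElem?_eq_getElem hi]
      · rw [if_neg hne]
        have hbl' : lines.getD i "" = "" := by simpa using hne
        have hj := lt_scanRun_of_blank lines i hi hbl'
        have hlen := scanRun_le_length lines i (by omega)
        rw [ih (scanRun lines i) _ (by omega), scanRun_blank_run lines i]
        rw [collapse_replicate (scanRun lines i - i) 0 (by omega)]
        have hreset : collapse ((0 : Int) + (scanRun lines i - i : Nat))
            (lines.drop (scanRun lines i)) = collapse 0 (lines.drop (scanRun lines i)) := by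
          apply collapse_reset
          by_cases hend : scanRun lines i < lines.length
          · right
            refine ⟨lines[scanRun lines i], lines.drop (scanRun lines i + 1),
              List.drop_eq_getElem_cons hend, ?_⟩
            have := scanRun_stop lines i hend
            rwa [List.getD_eq_getElem lines "" hend] at this
          · left; rw [List.drop_eq_nil_iff]; omega
        rw [hreset]
        have hmin : min (scanRun lines i - i) ((2 : Int) - 0).toNat
            = min 2 (scanRun lines i - i) := by omega
        rw [hmin, List.append_assoc]
    · rw [if_neg hi]
      have : lines.drop i = [] := by rw [List.drop_eq_nil_iff]; omega
      rw [this]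
      simp [collapse]

theorem emitRuns_eq (lines : List String) (i : Nat) (kept : List String) :
    emitRuns lines i kept = kept ++ collapse 0 (lines.drop i) :=
  emitRunsGo_eq lines _ i kept (by omega)

theorem mem_collapse {l' : String} : ∀ {k : Int} {ls : List String}, l' ∈ collapse k ls → l' ∈ ls := by
  intro k ls
  induction ls generalizing k with
  | nil => intro h; simp [collapse] at h
  | cons l ls ih =>
    intro h
    rw [collapse] at h
    split_ifs at h with h1 h2
    · rcases List.mem_cons.mp h with rfl | h3
      · exact List.mem_cons_self
      · exact List.mem_cons_of_mem _ (ih h3)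
    · exact List.mem_cons_of_mem _ (ih h)
    · rcases List.mem_cons.mp h with rfl | h3
      · exact List.mem_cons_self
      · exact List.mem_cons_of_mem _ (ih h3)

theorem popFrontA_eq (xs : List String) :
    (∀ l ∈ xs, (PySem.Str.strip l = "" ↔ l = "")) → popFrontA xs = dropLeadingBlanks xs := by
  induction xs with
  | nil => intro _; rfl
  | cons l ls ih =>
    intro hyp
    have hl := hyp l List.mem_cons_self
    have hls : ∀ x ∈ ls, (PySem.Str.strip x = "" ↔ x = "") :=
      fun x hx => hyp x (List.mem_cons_of_mem _ hx)
    rw [popFrontA, dropLeadingBlanks]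
    by_cases hb : l = ""
    · rw [if_pos (hl.mpr hb), if_neg (by simpa using hb), ih hls]
    · rw [if_neg (fun h => hb (hl.mp h)), if_pos hb]

theorem mem_dropLeadingBlanks {l : String} : ∀ {xs : List String}, l ∈ dropLeadingBlanks xs → l ∈ xs := by
  intro xs
  induction xs with
  | nil => intro h; simp [dropLeadingBlanks] at h
  | cons x ls ih =>
    intro h
    rw [dropLeadingBlanks] at h
    split_ifs at h
    · exact h
    · exact List.mem_cons_of_mem _ (ih h)

theorem popBackAGo_eq :
    ∀ (fuel : Nat) (xs : List String), xs.length ≤ fuel →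
    (∀ l ∈ xs, (PySem.Str.strip l = "" ↔ l = "")) →
    popBackAGo fuel xs = (dropLeadingBlanks xs.reverse).reverse := by
  intro fuel
  induction fuel with
  | zero =>
    intro xs hf _
    have : xs = [] := by
      cases xs with
      | nil => rfl
      | cons a t => simp at hf
    subst this
    rw [popBackAGo]; simp [dropLeadingBlanks]
  | succ fuel ih =>
    intro xs hf hyp
    rcases xs.eq_nil_or_concat with rfl | ⟨ys, x, rfl⟩
    · rw [popBackAGo, if_neg (by simp)]; simp [dropLeadingBlanks]
    · simp only [List.concat_eq_append] at hf hyp ⊢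
      have hx := hyp x (by simp)
      have hys : ∀ l ∈ ys, (PySem.Str.strip l = "" ↔ l = "") :=
        fun l hl => hyp l (by simp [hl])
      rw [popBackAGo]
      have hlastD : (ys ++ [x]).getLastD "" = x := by simp
      rw [hlastD]
      have hrev : (ys ++ [x]).reverse = x :: ys.reverse := by simp
      rw [hrev, dropLeadingBlanks]
      by_cases hb : x = ""
      · rw [if_pos ⟨by simp, hx.mpr hb⟩, if_neg (by simpa using hb), List.dropLast_concat]
        exact ih ys (by simp at hf ⊢; omega) hys
      · rw [if_neg (by rintro ⟨-, h⟩; exact hb (hx.mp h)), if_pos hb]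
        simp

theorem popBackA_eq (xs : List String)
    (hyp : ∀ l ∈ xs, (PySem.Str.strip l = "" ↔ l = "")) :
    popBackA xs = (dropLeadingBlanks xs.reverse).reverse :=
  popBackAGo_eq xs.length xs (le_refl _) hyp

theorem chars_join_append_empty (xs : List (List Char)) (h : xs ≠ []) :
    PySem.Chars.join ['\n'] (xs ++ [[]]) = PySem.Chars.join ['\n'] xs ++ ['\n'] := by
  induction xs with
  | nil => exact absurd rfl h
  | cons p rest ih =>
    cases rest with
    | nil =>
      rw [List.singleton_append, PySem.Chars.join_cons_cons, PySem.Chars.join_singleton,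
        PySem.Chars.join_singleton, List.append_nil]
    | cons q rest' =>
      have e1 : (p :: q :: rest') ++ [[]] = p :: q :: (rest' ++ [[]]) := by simp
      rw [e1, PySem.Chars.join_cons_cons, PySem.Chars.join_cons_cons]
      have e2 : q :: (rest' ++ [[]]) = (q :: rest') ++ [[]] := by simp
      rw [e2, ih (by simp)]
      simp [List.append_assoc]

theorem join_append_empty (xs : List String) (h : xs ≠ []) :
    PySem.Str.join "\n" (xs ++ [""]) = PySem.Str.join "\n" xs ++ "\n" := by
  rw [← String.toList_inj]
  rw [String.toList_append]
  simp only [PySem.Str.toList_join]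
  rw [List.map_append]
  have h1 : List.map String.toList [""] = [[]] := by rfl
  rw [h1]
  have h2 : ("\n" : String).toList = ['\n'] := by rfl
  rw [h2]
  exact chars_join_append_empty _ (by simpa using h)

-- ===== VERDICT (by name: the statement is the Claim_ definition above) =====
theorem clean_generated_code_spec : Claim_equal_clean_generated_code := by
  intro code _dom
  unfold Spec_clean_generated_code
  dsimp only [clean_generated_code, clean_generated_code_alt]
  set lines0 := (PySem.Str.split? code "\n").getD [] with hlines0
  have hmap : lines0.foldl (fun acc line => acc ++ [PySem.Str.rstrip line]) []
      = lines0.map PySem.Str.rstrip := by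
    simpa using PySem.List.foldl_append_singleton_eq_map (l := lines0) (f := PySem.Str.rstrip)
  rw [hmap]
  set L := lines0.map PySem.Str.rstrip with hL
  have HL : ∀ l ∈ L, (PySem.Str.strip l = "" ↔ l = "") := by
    intro l hl
    obtain ⟨s, _, rfl⟩ := List.mem_map.mp hl
    exact strip_rstrip_eq_empty_iff s
  rw [foldA_eq_collapse L HL 0 [], List.nil_append]
  rw [emitRuns_eq L 0 [], List.nil_append, List.drop_zero]
  set kept := collapse 0 L with hkept
  have HK : ∀ l ∈ kept, (PySem.Str.strip l = "" ↔ l = "") :=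
    fun l hl => HL l (mem_collapse hl)
  rw [popFrontA_eq kept HK]
  have HD : ∀ l ∈ dropLeadingBlanks kept, (PySem.Str.strip l = "" ↔ l = "") :=
    fun l hl => HK l (mem_dropLeadingBlanks hl)
  rw [popBackA_eq _ HD]
  set body := (dropLeadingBlanks (dropLeadingBlanks kept).reverse).reverse with hbody
  by_cases hb : body = []
  · rw [if_pos hb, if_pos hb, hb]
    rfl
  · rw [if_neg hb, if_neg hb]
    exact join_append_empty body hb
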